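-- pv_equiv track=rewrite | github.com/AlTheAlligator/BaccBot | Evolution/core/strategy.py | determine_chip_amount
-- ===== SOURCE A (Python) =====
-- CHIP_SIZES = [
--     2000,
--     1000,
--     500,
--     250,
--     50,
--     10
-- ]
--
-- def determine_chip_amount(bet_size):
--     """
--     Determine the chip amount based on the bet size.
--     """
--
--     remaining = bet_size
--     chips = []
--     for chip in CHIP_SIZES:
--         while remaining > 0:
--             if remaining >= chip:
--                 chips.append(chip)
--                 remaining -= chip
--             else:
--                 break
--
--     return chips
-- ===== SOURCE B (Python) =====
-- CHIP_SIZES = [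
--     2000,
--     1000,
--     500,
--     250,
--     50,
--     10
-- ]
--
-- def determine_chip_amount(bet_size):
--     """
--     Determine the chip amount based on the bet size.
--     """
--     remaining = bet_size
--     chips = []
--     for chip in CHIP_SIZES:
--         if remaining > 0:
--             count = remaining // chip
--             chips.extend([chip] * count)
--             remaining -= chip * count
--     return chips
-- ===== Notes on version B (the rewrite author's own statement) =====
-- stated objective: faster
-- what changed: Each denomination's multiplicity is computed once by floor division and appended in bulk, instead of the inner while loop that subtracts one chip at a time.
import Mathlib
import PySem

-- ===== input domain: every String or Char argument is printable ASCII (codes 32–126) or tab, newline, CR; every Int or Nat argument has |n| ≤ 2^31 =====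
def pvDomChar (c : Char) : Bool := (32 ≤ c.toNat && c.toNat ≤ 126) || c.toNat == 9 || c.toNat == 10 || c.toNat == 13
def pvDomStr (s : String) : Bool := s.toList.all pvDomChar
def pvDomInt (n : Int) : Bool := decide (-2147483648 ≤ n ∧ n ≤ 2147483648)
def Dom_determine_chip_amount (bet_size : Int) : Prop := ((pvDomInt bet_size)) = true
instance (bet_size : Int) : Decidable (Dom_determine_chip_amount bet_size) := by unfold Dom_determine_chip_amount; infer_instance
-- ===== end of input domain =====

-- B replaces A's one-chip-at-a-time inner while loop by a single floor division per
-- denomination and a bulk append (constant-factor speedup; identical output).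

-- ===== PORT A =====
def pvChipSizes : List Int := [2000, 1000, 500, 250, 50, 10]

-- the inner `while remaining > 0: if remaining >= chip: append/subtract else break`.
-- The `0 < chip` test is only a totality guard (every element of pvChipSizes is
-- positive); it is never the reason the loop stops on the inputs the ports see.
def pvWhileA (chip : Int) (remaining : Int) (chips : List Int) : Int × List Int :=
  if remaining > 0 then
    if chip ≤ remaining then
      if 0 < chip then pvWhileA chip (remaining - chip) (chips ++ [chip])
      else (remaining, chips)
    else (remaining, chips)
  else (remaining, chips)
termination_by remaining.toNat
decreasing_by omega

def determine_chip_amount (bet_size : Int) : List Int :=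
  (pvChipSizes.foldl (fun s chip => pvWhileA chip s.1 s.2) (bet_size, ([] : List Int))).2

-- ===== PORT B =====
-- one `for chip in CHIP_SIZES` step of Source B: bulk-append `remaining // chip` chips
def pvStepB (s : Int × List Int) (chip : Int) : Int × List Int :=
  if s.1 > 0 then
    let count := PySem.Int.floordiv s.1 chip
    (s.1 - chip * count, s.2 ++ List.replicate count.toNat chip)
  else s

def determine_chip_amount_alt (bet_size : Int) : List Int :=
  (pvChipSizes.foldl pvStepB (bet_size, ([] : List Int))).2

-- ===== PRECONDITION & SPEC =====
def Spec_determine_chip_amount (bet_size : Int) (out : List Int) : Prop := out = determine_chip_amount_alt bet_size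
instance (bet_size : Int) (out : List Int) : Decidable (Spec_determine_chip_amount bet_size out) := by unfold Spec_determine_chip_amount; infer_instance

-- ===== CLAIM (what is proved, stated in full; the proofs are below) =====
def Claim_equal_determine_chip_amount : Prop := ∀ (bet_size : Int), Dom_determine_chip_amount bet_size → Spec_determine_chip_amount bet_size (determine_chip_amount bet_size)

-- ===== LEMMAS AND PROOFS =====

-- B's division step absorbs one subtraction of A's loop.
lemma pvStepB_absorb (chip r : Int) (chips : List Int) (hc : 0 < chip) (hr : chip ≤ r) :
    pvStepB (r - chip, chips ++ [chip]) chip = pvStepB (r, chips) chip := by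
  have hq1 : 1 ≤ PySem.Int.floordiv r chip :=
    (PySem.Int.le_floordiv_iff_mul_le hc).2 (by linarith)
  have hq : PySem.Int.floordiv r chip * chip ≤ r ∧ r < (PySem.Int.floordiv r chip + 1) * chip :=
    (PySem.Int.floordiv_eq_iff_of_pos hc).1 rfl
  set q := PySem.Int.floordiv r chip with hqdef
  by_cases h0 : r - chip > 0
  · have hq' : PySem.Int.floordiv (r - chip) chip = q - 1 := by
      rw [PySem.Int.floordiv_eq_iff_of_pos hc]
      constructor <;> nlinarith [hq.1, hq.2]
    simp only [pvStepB, if_pos h0, if_pos (show r > 0 by linarith), hq', ← hqdef]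
    have h1 : r - chip - chip * (q - 1) = r - chip * q := by ring
    have hnat : (q - 1).toNat + 1 = q.toNat := by omega
    have h2 : chips ++ [chip] ++ List.replicate (q - 1).toNat chip
        = chips ++ List.replicate q.toNat chip := by
      rw [List.append_assoc, ← hnat, List.replicate_succ]
      rfl
    rw [h1, h2]
  · -- r = chip: one chip fits exactly, q = 1
    have hrc : r = chip := by omega
    have hq1' : q = 1 := by
      rw [hqdef, PySem.Int.floordiv_eq_iff_of_pos hc]
      constructor <;> nlinarith
    simp only [pvStepB, if_neg h0, if_pos (show r > 0 by linarith), hq1', ← hqdef]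
    subst hrc
    simp

-- A's inner while loop equals B's division step, for a positive chip.
lemma pvWhileA_eq_stepB (chip : Int) (hc : 0 < chip) (r : Int) (chips : List Int) :
    pvWhileA chip r chips = pvStepB (r, chips) chip := by
  generalize hn : r.toNat = n
  induction n using Nat.strong_induction_on generalizing r chips with
  | _ n ih =>
    by_cases hr : r > 0
    · by_cases hcr : chip ≤ r
      · rw [pvWhileA, if_pos hr, if_pos hcr, if_pos hc,
            ih (r - chip).toNat (by omega) _ _ rfl, pvStepB_absorb chip r chips hc hcr]
      · have hz : PySem.Int.floordiv r chip = 0 := by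
          rw [PySem.Int.floordiv_eq_iff_of_pos hc]; constructor <;> linarith
        rw [pvWhileA, if_pos hr, if_neg hcr]
        simp [pvStepB, hz]
    · rw [pvWhileA, if_neg hr]
      simp [pvStepB, hr]

lemma fold_eq (L : List Int) (hL : ∀ c ∈ L, 0 < c) :
    ∀ s : Int × List Int,
      L.foldl (fun s chip => pvWhileA chip s.1 s.2) s = L.foldl pvStepB s := by
  induction L with
  | nil => intro s; rfl
  | cons c t ih =>
    intro s
    simp only [List.foldl_cons]
    rw [pvWhileA_eq_stepB c (hL c (by simp))]
    exact ih (fun x hx => hL x (by simp [hx])) _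

-- ===== VERDICT (by name: the statement is the Claim_ definition above) =====
theorem determine_chip_amount_spec : Claim_equal_determine_chip_amount := by
  intro bet_size _
  unfold Spec_determine_chip_amount determine_chip_amount determine_chip_amount_alt
  rw [fold_eq pvChipSizes (by decide)]
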